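-- pv_equiv track=rewrite | github.com/ThomasTrepanier/log6307-final-project | data/interim/stackoverflow/src/python/15_67.py | summer_69_Accepted
-- ===== SOURCE A (Python) =====
-- def summer_69_Accepted(lst):
--     copyoflist = lst[:] # makes shallow copy of list
--     while True:
--         if 6 not in copyoflist:
--             return sum(copyoflist)
--
--         indexof6 = copyoflist.index(6)
--         indexof9 = copyoflist.index(9, indexof6+1) # begin search for 9 after 6
--         del copyoflist[indexof6:indexof9+1]
-- ===== SOURCE B (Python) =====
-- def summer_69_Accepted(lst):
--     total = 0
--     skipping = False
--     for x in lst: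
--         if skipping:
--             if x == 9:
--                 skipping = False
--         elif x == 6:
--             skipping = True
--         else:
--             total += x
--     return total
-- ===== Notes on version B (the rewrite author's own statement) =====
-- stated objective: alternative
-- what changed: Replaced the repeated index/delete loop over a mutated copy with a single left-to-right pass keeping a running total and a skip flag (no copying, no deletion).
-- outside the precondition, e.g. on summer_69_Accepted([1, 6, 2]): A raises ValueError, B returns 1
import Mathlib
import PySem

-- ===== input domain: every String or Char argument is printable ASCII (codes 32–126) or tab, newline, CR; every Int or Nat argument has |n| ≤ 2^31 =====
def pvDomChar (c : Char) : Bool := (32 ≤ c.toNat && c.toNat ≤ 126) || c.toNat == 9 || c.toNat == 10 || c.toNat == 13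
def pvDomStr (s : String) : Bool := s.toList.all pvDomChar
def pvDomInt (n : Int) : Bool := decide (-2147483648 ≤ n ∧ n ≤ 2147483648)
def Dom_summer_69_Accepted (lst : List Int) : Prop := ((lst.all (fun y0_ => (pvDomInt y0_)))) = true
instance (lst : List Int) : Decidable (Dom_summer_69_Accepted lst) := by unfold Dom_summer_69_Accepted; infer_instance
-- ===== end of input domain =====

-- B replaces A's repeated index/delete loop over a mutated copy with a single pass holding a running total and a skip flag. Pre_ excludes the inputs on which A raises ValueError (a 6 with no 9 after it).


-- ===== PORT A =====
-- the 'while True' loop over the shrinking copy; terminates since each deletion removes ≥ 2 elements.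
-- 'copyoflist.index(9, indexof6+1)' is ported as index? on the drop (exact: list.index(v, s) with 0 ≤ s ≤ len
-- returns s + the first index of v in the suffix); a 'none' is Python's ValueError, excluded by Pre_ (default 0).
def sumLoopA (l : List Int) : Int :=
  if h : (6 : Int) ∈ l then
    -- copyoflist.index(6): 6 ∈ l here, so Python's .index returns the first index (getD 0 is never taken)
    let i6 := (PySem.List.index? l 6).getD 0
    -- copyoflist.index(9, indexof6+1): first index of 9 at or after i6+1; none = ValueError (Pre_ excludes)
    match PySem.List.index? (l.drop (i6 + 1)) 9 with
    | none => 0  -- Python raises ValueError here; Pre_ excludes these inputs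
    | some k => sumLoopA (l.take i6 ++ l.drop (i6 + 1 + k + 1))
  else l.sum
termination_by l.length
decreasing_by
  obtain ⟨j, hj⟩ := Option.isSome_iff_exists.mp ((PySem.List.index?_isSome_iff l 6).mpr h)
  obtain ⟨hlt, -, -⟩ := PySem.List.getElem_of_index?_eq_some hj
  rw [PySem.List.index?_eq_idxOf?] at hj
  simp [hj, List.length_append, List.length_take, List.length_drop]
  omega

def summer_69_Accepted (lst : List Int) : Int :=
  sumLoopA lst  -- lst[:] is a shallow copy; lists are immutable here

-- ===== PORT B =====
-- state = (running total, skipping flag); one fold over the list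
def bStep (s : Int × Bool) (x : Int) : Int × Bool :=
  if s.2 then (if x = 9 then (s.1, false) else s)
  else if x = 6 then (s.1, true)
  else (s.1 + x, s.2)

def summer_69_Accepted_alt (lst : List Int) : Int :=
  (lst.foldl bStep (0, false)).1

-- ===== PRECONDITION & SPEC =====
-- Pre_ excludes exactly the inputs on which A raises ValueError: some 6 with no 9 after it.
def Pre_summer_69_Accepted (lst : List Int) : Prop :=
  ∀ i, i < lst.length → lst.getD i 0 = 6 → (9 : Int) ∈ lst.drop (i + 1)
instance (lst : List Int) : Decidable (Pre_summer_69_Accepted lst) := by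
  unfold Pre_summer_69_Accepted; infer_instance

def pvWitness_summer_69_Accepted : List Int := [4, 5, 6, 7, 8, 9, 3]

def Spec_summer_69_Accepted (lst : List Int) (out : Int) : Prop := out = summer_69_Accepted_alt lst
instance (lst : List Int) (out : Int) : Decidable (Spec_summer_69_Accepted lst out) := by unfold Spec_summer_69_Accepted; infer_instance

-- ===== CLAIM (what is proved, stated in full; the proofs are below) =====
def Claim_equal_summer_69_Accepted : Prop := ∀ (lst : List Int), Dom_summer_69_Accepted lst → Pre_summer_69_Accepted lst → Spec_summer_69_Accepted lst (summer_69_Accepted lst)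

-- ===== LEMMAS AND PROOFS =====

-- skipping state passes over a 9-free block and is cleared by the next 9
theorem foldl_bStep_skip (m r : List Int) (t : Int) (hm : (9 : Int) ∉ m) :
    List.foldl bStep (t, true) (m ++ 9 :: r) = List.foldl bStep (t, false) r := by
  induction m with
  | nil =>
    simp only [List.nil_append, List.foldl_cons]
    rw [show bStep (t, true) 9 = (t, false) from by simp [bStep]]
  | cons x xs ih =>
    simp only [List.mem_cons, not_or] at hm
    have hx : x ≠ 9 := Ne.symm hm.1
    simp only [List.cons_append, List.foldl_cons]
    rw [show bStep (t, true) x = (t, true) from by simp [bStep, hx]]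
    exact ih hm.2

-- a 6-free block just adds its sum to the total
theorem foldl_bStep_sum (t r : List Int) (a : Int) (ht : (6 : Int) ∉ t) :
    List.foldl bStep (a, false) (t ++ r) = List.foldl bStep (a + t.sum, false) r := by
  induction t generalizing a with
  | nil => simp
  | cons x xs ih =>
    simp only [List.mem_cons, not_or] at ht
    have hx : ¬ x = 6 := fun h => ht.1 h.symm
    have h9 : bStep (a, false) x = (a + x, false) := by
      simp [bStep, hx]
    simp only [List.cons_append, List.foldl_cons, h9, ih _ ht.2, List.sum_cons]
    ring_nf

theorem foldl_bStep_no6 (t : List Int) (a : Int) (ht : (6 : Int) ∉ t) :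
    (List.foldl bStep (a, false) t).1 = a + t.sum := by
  have h2 : List.foldl bStep (a, false) t = (a + t.sum, false) := by
    simpa using foldl_bStep_sum t [] a ht
  rw [h2]

-- Pre_ is preserved by deleting a leading 6-free prefix together with a 6..9 segment
theorem pre_step (pre m r : List Int) (hpre6 : (6 : Int) ∉ pre)
    (h : Pre_summer_69_Accepted (pre ++ 6 :: m ++ 9 :: r)) :
    Pre_summer_69_Accepted (pre ++ r) := by
  intro i hi h6
  have hgetd : (pre ++ r).getD i 0 = (pre ++ r)[i]'hi := List.getD_eq_getElem _ _ hi
  rw [hgetd] at h6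
  simp only [List.length_append] at hi
  by_cases hip : i < pre.length
  · exfalso
    apply hpre6
    rw [List.getElem_append_left hip] at h6
    exact h6 ▸ List.getElem_mem _
  · -- the 6 is in r at index j := i - pre.length
    have hj : i - pre.length < r.length := by omega
    have hr6 : r[i - pre.length]'hj = 6 := by
      rw [List.getElem_append_right (by omega)] at h6; exact h6
    set L := pre ++ 6 :: m ++ 9 :: r with hL
    have hL2 : L = (pre ++ 6 :: m ++ [9]) ++ r := by simp [hL]
    set I := pre.length + 1 + m.length + 1 + (i - pre.length) with hI
    have hIlt : I < L.length := by
      rw [hL2]; simp [List.length_append]; omega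
    have hLI : L.getD I 0 = 6 := by
      have hIlt2 : I < ((pre ++ 6 :: m ++ [9]) ++ r).length := hL2 ▸ hIlt
      rw [hL2, List.getD_eq_getElem _ _ hIlt2,
        List.getElem_append_right (by simp [List.length_append]; omega)]
      convert hr6 using 2
      simp [List.length_append]
      omega
    have h9 := h I hIlt hLI
    have hdropL : L.drop (I + 1) = r.drop (i - pre.length + 1) := by
      rw [hL2, List.drop_append,
        List.drop_eq_nil_of_le (by simp [List.length_append]; omega), List.nil_append]
      congr 1
      simp [List.length_append]
      omega
    rw [hdropL] at h9
    rw [List.drop_append]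
    refine List.mem_append_right _ ?_
    have he : i + 1 - pre.length = i - pre.length + 1 := by omega
    rw [he]
    exact h9

-- main invariant: on Pre_, A's delete loop equals B's fold
theorem sumLoopA_eq (n : Nat) : ∀ l : List Int, l.length ≤ n → Pre_summer_69_Accepted l →
    sumLoopA l = (List.foldl bStep (0, false) l).1 := by
  induction n with
  | zero =>
    intro l hl _
    have : l = [] := List.eq_nil_of_length_eq_zero (by omega)
    subst this; rw [sumLoopA.eq_def]; simp
  | succ n ih =>
    intro l hl hpre
    by_cases h6 : (6 : Int) ∈ l
    · -- decompose l = pre ++ 6 :: suf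
      obtain ⟨i6, hi6⟩ := Option.isSome_iff_exists.mp ((PySem.List.index?_isSome_iff l 6).mpr h6)
      obtain ⟨p, suf, hlp, hplen, hp6⟩ := (PySem.List.index?_eq_some_iff l 6 i6).mp hi6
      -- a 9 exists after the 6
      have hi6lt : i6 < l.length := by
        have hlen := congrArg List.length hlp
        simp [List.length_append] at hlen
        omega
      have hget6 : l.getD i6 0 = 6 := by
        rw [List.getD_eq_getElem _ _ hi6lt]
        obtain ⟨_, hv, -⟩ := PySem.List.getElem_of_index?_eq_some hi6
        exact hv
      have hdrop : l.drop (i6 + 1) = suf := by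
        rw [hlp, List.drop_append, ← hplen,
          List.drop_eq_nil_of_le (by omega), List.nil_append]
        simp
      have h9mem : (9 : Int) ∈ suf := hdrop ▸ hpre i6 hi6lt hget6
      obtain ⟨k, hk⟩ := Option.isSome_iff_exists.mp ((PySem.List.index?_isSome_iff suf 9).mpr h9mem)
      obtain ⟨m, r, hsuf, hmlen, hm9⟩ := (PySem.List.index?_eq_some_iff suf 9 k).mp hk
      -- unfold one step of the loop
      have htake : l.take i6 = p := by
        rw [hlp, List.take_append, ← hplen]
        simp
      have hdrop2 : l.drop (i6 + 1 + k + 1) = r := by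
        have : l.drop (i6 + 1 + k + 1) = (l.drop (i6 + 1)).drop (k + 1) := by
          rw [List.drop_drop]; ring_nf
        rw [this, hdrop, hsuf, List.drop_append, ← hmlen,
          List.drop_eq_nil_of_le (by omega), List.nil_append]
        simp
      have hstep : sumLoopA l = sumLoopA (p ++ r) := by
        rw [sumLoopA.eq_def, dif_pos h6]
        simp only [hi6, Option.getD_some, hdrop, hk, htake, hdrop2]
      have hlen : (p ++ r).length ≤ n := by
        have h1 := congrArg List.length hlp
        have h2 := congrArg List.length hsuf
        simp [List.length_append] at h1 h2
        simp [List.length_append]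
        omega
      have hpre' : Pre_summer_69_Accepted (p ++ r) := by
        apply pre_step p m r hp6
        have heq : p ++ 6 :: m ++ 9 :: r = l := by rw [hlp, hsuf]; simp
        rw [heq]; exact hpre
      rw [hstep, ih (p ++ r) hlen hpre']
      -- now B's fold agrees on l and on p ++ r
      rw [hlp, hsuf]
      rw [foldl_bStep_sum p r 0 hp6, foldl_bStep_sum p (6 :: (m ++ 9 :: r)) 0 hp6]
      simp only [List.foldl_cons]
      rw [show bStep (0 + p.sum, false) 6 = (0 + p.sum, true) from by simp [bStep]]
      rw [foldl_bStep_skip m r _ hm9]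
    · rw [sumLoopA.eq_def, dif_neg h6]
      rw [foldl_bStep_no6 l 0 h6]
      omega

-- ===== VERDICT (by name: the statement is the Claim_ definition above) =====
theorem summer_69_Accepted_spec : Claim_equal_summer_69_Accepted := by
  intro lst _ hpre
  unfold Spec_summer_69_Accepted summer_69_Accepted summer_69_Accepted_alt
  exact sumLoopA_eq lst.length lst le_rfl hpre
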